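-- pv_equiv track=rewrite | github.com/JamesAskelson/dsa-solutions | random-leetcode/sum-78/py.py | sum78
-- ===== SOURCE A (Python) =====
-- def sum78(nums):
--   max_sum = 0
--   inside = False
--
--   for num in nums:
--     if num == 7:
--       inside = True
--     elif inside == False:
--       max_sum = max_sum + num
--     elif inside == True and num == 8:
--       inside = False
--   return max_sum
-- ===== SOURCE B (Python) =====
-- def sum78(nums):
--     total = 0
--     i = 0
--     n = len(nums)
--     while i < n:
--         if nums[i] == 7:
--             i += 1
--             while i < n and nums[i] != 8:
--                 i += 1
--             i += 1  # step past the closing 8 (or past the end)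
--         else:
--             total += nums[i]
--             i += 1
--     return total
-- ===== Notes on version B (the rewrite author's own statement) =====
-- stated objective: alternative
-- what changed: Replaces the boolean inside-flag state machine over a for loop by an index-driven while loop with a nested skip-loop that consumes a whole 7..8 bracket at once.
import Mathlib
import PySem

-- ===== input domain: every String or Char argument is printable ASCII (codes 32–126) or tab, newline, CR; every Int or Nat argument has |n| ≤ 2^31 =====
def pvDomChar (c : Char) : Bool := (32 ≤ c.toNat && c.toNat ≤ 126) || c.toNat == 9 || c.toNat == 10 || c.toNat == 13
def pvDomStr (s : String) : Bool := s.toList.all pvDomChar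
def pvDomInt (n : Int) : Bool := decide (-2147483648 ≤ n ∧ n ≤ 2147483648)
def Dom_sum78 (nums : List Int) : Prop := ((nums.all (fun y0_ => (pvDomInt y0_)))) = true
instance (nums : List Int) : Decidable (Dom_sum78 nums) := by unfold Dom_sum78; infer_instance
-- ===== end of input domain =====

-- B replaces A's inside-flag state machine by a nested skip-loop consuming each 7..8 bracket at once; alternative decomposition, same cost.

-- ===== PORT A =====
-- loop body of A: state = (max_sum, inside)
def sum78Step (st : Int × Bool) (num : Int) : Int × Bool :=
  if num == 7 then (st.1, true)
  else if st.2 == false then (st.1 + num, st.2)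
  else if st.2 == true && num == 8 then (st.1, false)
  else st

def sum78 (nums : List Int) : Int :=
  (nums.foldl sum78Step (0, false)).1

-- ===== PORT B =====
-- inner while loop of B: advance past elements until (and including) the first 8
def sum78Skip : List Int → List Int
  | [] => []
  | x :: xs => if x == 8 then xs else sum78Skip xs

theorem sum78Skip_length_le : ∀ (l : List Int), (sum78Skip l).length ≤ l.length
  | [] => Nat.le_refl _
  | x :: xs => by
      simp only [sum78Skip]
      split
      · exact Nat.le_succ _
      · exact Nat.le_trans (sum78Skip_length_le xs) (Nat.le_succ _)

-- outer while loop of B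
def sum78_alt : List Int → Int
  | [] => 0
  | x :: xs =>
      if x == 7 then sum78_alt (sum78Skip xs)
      else x + sum78_alt xs
termination_by l => l.length
decreasing_by
  · exact Nat.lt_succ_of_le (sum78Skip_length_le xs)
  · exact Nat.lt_succ_self _

-- ===== PRECONDITION & SPEC =====
def Spec_sum78 (nums : List Int) (out : Int) : Prop := out = sum78_alt nums
instance (nums : List Int) (out : Int) : Decidable (Spec_sum78 nums out) := by unfold Spec_sum78; infer_instance

-- ===== CLAIM (what is proved, stated in full; the proofs are below) =====
def Claim_equal_sum78 : Prop := ∀ (nums : List Int), Dom_sum78 nums → Spec_sum78 nums (sum78 nums)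

-- ===== LEMMAS AND PROOFS =====
-- invariant: A's fold from (s, false) computes s + B's sum; from (s, true) it computes s + B's sum of the skipped tail
theorem sum78_inv : ∀ (l : List Int) (s : Int),
    (l.foldl sum78Step (s, false)).1 = s + sum78_alt l ∧
    (l.foldl sum78Step (s, true)).1 = s + sum78_alt (sum78Skip l)
  | [], s => by simp [sum78_alt, sum78Skip]
  | x :: xs, s => by
      by_cases h7 : x = 7
      · subst h7
        simp only [List.foldl, sum78Step, sum78_alt, sum78Skip]
        norm_num
        exact (sum78_inv xs s).2
      · by_cases h8 : x = 8
        · subst h8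
          simp only [List.foldl, sum78Step, sum78_alt, sum78Skip]
          norm_num
          constructor
          · rw [(sum78_inv xs (s + 8)).1]; ring
          · exact (sum78_inv xs s).1
        · simp only [List.foldl, sum78Step, sum78_alt, sum78Skip]
          simp only [show (x == 7) = false by simp [h7], show (x == 8) = false by simp [h8]]
          norm_num
          constructor
          · rw [(sum78_inv xs (s + x)).1]; ring
          · exact (sum78_inv xs s).2

-- ===== VERDICT (by name: the statement is the Claim_ definition above) =====
theorem sum78_spec : Claim_equal_sum78 := by
  intro nums _
  unfold Spec_sum78 sum78
  rw [(sum78_inv nums 0).1]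
  ring
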